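-- pv_equiv track=rewrite | github.com/nik464/agri-drone | src/agridrone/vision/llm_validator.py | _same_disease_family
-- ===== SOURCE A (Python) =====
-- def _same_disease_family(name_a: str, name_b: str) -> bool:
--     """Check if two diseases are in the same family (e.g., all rusts)."""
--     families = [
--         {"rust", "yellow rust", "stripe rust", "brown rust", "leaf rust", "black rust", "stem rust"},
--         {"blast", "rice blast", "wheat blast"},
--         {"blight", "fhb", "fusarium", "scab", "head blight", "leaf blight", "bacterial blight"},
--         {"spot", "tan spot", "brown spot"},
--         {"mildew", "powdery mildew"},
--         {"healthy"},
--     ]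
--     for family in families:
--         in_a = any(term in name_a for term in family)
--         in_b = any(term in name_b for term in family)
--         if in_a and in_b:
--             return True
--     return False
-- ===== SOURCE B (Python) =====
-- def _same_disease_family(name_a: str, name_b: str) -> bool:
--     """Check if two diseases are in the same family (e.g., all rusts)."""
--     # Minimal keyword table with one bit per family.  Every multi-word term of
--     # the original families (e.g. "yellow rust", "head blight") contains one of
--     # these keywords as a substring, so searching only the keywords is exact.
--     keyword_bits = [
--         ("rust", 1),
--         ("blast", 2),
--         ("blight", 4), ("fhb", 4), ("fusarium", 4), ("scab", 4),
--         ("spot", 8),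
--         ("mildew", 16),
--         ("healthy", 32),
--     ]
--     mask_a = 0
--     mask_b = 0
--     for keyword, bit in keyword_bits:
--         if keyword in name_a:
--             mask_a |= bit
--         if keyword in name_b:
--             mask_b |= bit
--     return mask_a & mask_b != 0
-- ===== Notes on version B (the rewrite author's own statement) =====
-- stated objective: faster
-- what changed: Replaces the nested loop over six families of 27 terms by a single flat pass over a minimal 9-keyword table (redundant superstring terms like 'yellow rust' are dropped because they imply their keyword), accumulating per-family bitmasks for both names and testing mask intersection.
import Mathlib
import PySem

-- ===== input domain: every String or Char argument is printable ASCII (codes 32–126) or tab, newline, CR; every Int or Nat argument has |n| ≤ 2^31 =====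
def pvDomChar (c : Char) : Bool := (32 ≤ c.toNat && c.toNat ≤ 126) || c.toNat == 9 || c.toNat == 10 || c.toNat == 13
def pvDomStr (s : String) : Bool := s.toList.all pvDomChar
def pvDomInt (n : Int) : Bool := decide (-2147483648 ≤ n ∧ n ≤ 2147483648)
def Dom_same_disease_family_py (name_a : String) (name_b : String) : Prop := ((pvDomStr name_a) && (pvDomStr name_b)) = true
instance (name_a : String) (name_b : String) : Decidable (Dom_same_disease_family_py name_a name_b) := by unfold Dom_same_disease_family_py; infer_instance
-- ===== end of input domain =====

-- B replaces A's nested loop over six families (27 terms) by one flat pass over a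
-- minimal 9-keyword table accumulating per-family bitmasks; redundant superstring
-- terms are dropped since they imply their keyword (objective: faster, constant factor).


-- ===== PORT A =====
-- A's families table (Python set literals; any() over a set is order-independent)
def pvFam0 : List String := ["rust", "yellow rust", "stripe rust", "brown rust", "leaf rust", "black rust", "stem rust"]
def pvFam1 : List String := ["blast", "rice blast", "wheat blast"]
def pvFam2 : List String := ["blight", "fhb", "fusarium", "scab", "head blight", "leaf blight", "bacterial blight"]
def pvFam3 : List String := ["spot", "tan spot", "brown spot"]
def pvFam4 : List String := ["mildew", "powdery mildew"]
def pvFam5 : List String := ["healthy"]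
def pvFamilies : List (List String) := [pvFam0, pvFam1, pvFam2, pvFam3, pvFam4, pvFam5]

-- A's loop over the families with early return
def pvLoopA (name_a : String) (name_b : String) : List (List String) → Bool
  | [] => false
  | family :: rest =>
    let in_a := family.any (fun term => PySem.Str.isIn term name_a)
    let in_b := family.any (fun term => PySem.Str.isIn term name_b)
    if in_a && in_b then true else pvLoopA name_a name_b rest

def same_disease_family_py (name_a : String) (name_b : String) : Bool :=
  pvLoopA name_a name_b pvFamilies

-- ===== PORT B =====
-- B's flat minimal keyword table: one bit per family
def pvKeywordBits : List (String × Int) :=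
  [("rust", 1), ("blast", 2), ("blight", 4), ("fhb", 4), ("fusarium", 4), ("scab", 4),
   ("spot", 8), ("mildew", 16), ("healthy", 32)]

def same_disease_family_py_alt (name_a : String) (name_b : String) : Bool :=
  let m := pvKeywordBits.foldl (fun (m : Int × Int) p =>
    (if PySem.Str.isIn p.1 name_a then Int.lor m.1 p.2 else m.1,
     if PySem.Str.isIn p.1 name_b then Int.lor m.2 p.2 else m.2)) (0, 0)
  decide (Int.land m.1 m.2 ≠ 0)

-- ===== PRECONDITION & SPEC =====
def Spec_same_disease_family_py (name_a : String) (name_b : String) (out : Bool) : Prop := out = same_disease_family_py_alt name_a name_b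
instance (name_a : String) (name_b : String) (out : Bool) : Decidable (Spec_same_disease_family_py name_a name_b out) := by unfold Spec_same_disease_family_py; infer_instance

-- ===== CLAIM (what is proved, stated in full; the proofs are below) =====
def Claim_equal_same_disease_family_py : Prop := ∀ (name_a : String) (name_b : String), Dom_same_disease_family_py name_a name_b → Spec_same_disease_family_py name_a name_b (same_disease_family_py name_a name_b)

-- ===== LEMMAS AND PROOFS =====

-- substring monotonicity: if t is a substring of s and s occurs in n, t occurs in n
theorem pv_isIn_of_isIn {t s n : String} (h : t.toList <:+: s.toList)
    (hs : PySem.Str.isIn s n = true) : PySem.Str.isIn t n = true := by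
  rw [PySem.Str.isIn_iff_infix] at hs ⊢
  exact h.trans hs

theorem pv_isIn_sub_false {t s n : String} (h : t.toList <:+: s.toList)
    (ht : PySem.Str.isIn t n = false) : PySem.Str.isIn s n = false := by
  cases hs : PySem.Str.isIn s n with
  | false => rfl
  | true => exfalso; rw [pv_isIn_of_isIn h hs] at ht; exact Bool.noConfusion ht

-- each family's `any` collapses to its minimal keywords
theorem pv_fam0_any (n : String) :
    pvFam0.any (fun t => PySem.Str.isIn t n) = PySem.Str.isIn "rust" n := by
  cases hr : PySem.Str.isIn "rust" n with
  | true => simp only [pvFam0, List.any_cons, hr, Bool.true_or]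
  | false =>
    have h1 := pv_isIn_sub_false (t := "rust") (s := "yellow rust") (by decide) hr
    have h2 := pv_isIn_sub_false (t := "rust") (s := "stripe rust") (by decide) hr
    have h3 := pv_isIn_sub_false (t := "rust") (s := "brown rust") (by decide) hr
    have h4 := pv_isIn_sub_false (t := "rust") (s := "leaf rust") (by decide) hr
    have h5 := pv_isIn_sub_false (t := "rust") (s := "black rust") (by decide) hr
    have h6 := pv_isIn_sub_false (t := "rust") (s := "stem rust") (by decide) hr
    simp only [pvFam0, List.any_cons, List.any_nil, hr, h1, h2, h3, h4, h5, h6, Bool.or_false]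

theorem pv_fam1_any (n : String) :
    pvFam1.any (fun t => PySem.Str.isIn t n) = PySem.Str.isIn "blast" n := by
  cases hr : PySem.Str.isIn "blast" n with
  | true => simp only [pvFam1, List.any_cons, hr, Bool.true_or]
  | false =>
    have h1 := pv_isIn_sub_false (t := "blast") (s := "rice blast") (by decide) hr
    have h2 := pv_isIn_sub_false (t := "blast") (s := "wheat blast") (by decide) hr
    simp only [pvFam1, List.any_cons, List.any_nil, hr, h1, h2, Bool.or_false]

theorem pv_fam2_any (n : String) :
    pvFam2.any (fun t => PySem.Str.isIn t n) =
      (PySem.Str.isIn "blight" n || PySem.Str.isIn "fhb" n ||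
       PySem.Str.isIn "fusarium" n || PySem.Str.isIn "scab" n) := by
  cases hr : PySem.Str.isIn "blight" n with
  | true => simp only [pvFam2, List.any_cons, hr, Bool.true_or]
  | false =>
    have h1 := pv_isIn_sub_false (t := "blight") (s := "head blight") (by decide) hr
    have h2 := pv_isIn_sub_false (t := "blight") (s := "leaf blight") (by decide) hr
    have h3 := pv_isIn_sub_false (t := "blight") (s := "bacterial blight") (by decide) hr
    simp only [pvFam2, List.any_cons, List.any_nil, hr, h1, h2, h3,
      Bool.false_or, Bool.or_false, Bool.or_assoc]

theorem pv_fam3_any (n : String) :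
    pvFam3.any (fun t => PySem.Str.isIn t n) = PySem.Str.isIn "spot" n := by
  cases hr : PySem.Str.isIn "spot" n with
  | true => simp only [pvFam3, List.any_cons, hr, Bool.true_or]
  | false =>
    have h1 := pv_isIn_sub_false (t := "spot") (s := "tan spot") (by decide) hr
    have h2 := pv_isIn_sub_false (t := "spot") (s := "brown spot") (by decide) hr
    simp only [pvFam3, List.any_cons, List.any_nil, hr, h1, h2, Bool.or_false]

theorem pv_fam4_any (n : String) :
    pvFam4.any (fun t => PySem.Str.isIn t n) = PySem.Str.isIn "mildew" n := by
  cases hr : PySem.Str.isIn "mildew" n with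
  | true => simp only [pvFam4, List.any_cons, hr, Bool.true_or]
  | false =>
    have h1 := pv_isIn_sub_false (t := "mildew") (s := "powdery mildew") (by decide) hr
    simp only [pvFam4, List.any_cons, List.any_nil, hr, h1, Bool.or_false]

theorem pv_fam5_any (n : String) :
    pvFam5.any (fun t => PySem.Str.isIn t n) = PySem.Str.isIn "healthy" n := by
  simp only [pvFam5, List.any_cons, List.any_nil, Bool.or_false]

-- the mask built by B's loop, as a function of the nine keyword tests
def pvMaskOf (r bl b1 b2 b3 b4 sp mi he : Bool) : Int :=
  [(r, (1 : Int)), (bl, 2), (b1, 4), (b2, 4), (b3, 4), (b4, 4), (sp, 8), (mi, 16), (he, 32)].foldl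
    (fun m p => if p.1 then Int.lor m p.2 else m) 0

def pvBitsVal (x0 x1 x2 x3 x4 x5 : Bool) : Int :=
  (if x0 then 1 else 0) + (if x1 then 2 else 0) + (if x2 then 4 else 0) +
  (if x3 then 8 else 0) + (if x4 then 16 else 0) + (if x5 then 32 else 0)

set_option maxHeartbeats 4000000 in
theorem pv_mask_eq : ∀ r bl b1 b2 b3 b4 sp mi he : Bool,
    pvMaskOf r bl b1 b2 b3 b4 sp mi he = pvBitsVal r bl (b1 || b2 || b3 || b4) sp mi he := by
  decide

set_option maxHeartbeats 4000000 in
theorem pv_land_eq : ∀ x0 x1 x2 x3 x4 x5 y0 y1 y2 y3 y4 y5 : Bool,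
    (decide (Int.land (pvBitsVal x0 x1 x2 x3 x4 x5) (pvBitsVal y0 y1 y2 y3 y4 y5) ≠ 0)) =
    ((x0 && y0) || (x1 && y1) || (x2 && y2) || (x3 && y3) || (x4 && y4) || (x5 && y5)) := by
  decide

-- B's result in terms of the nine keyword tests on each name
theorem pv_alt_char (na nb : String) :
    same_disease_family_py_alt na nb =
      (decide (Int.land
        (pvMaskOf (PySem.Str.isIn "rust" na) (PySem.Str.isIn "blast" na)
          (PySem.Str.isIn "blight" na) (PySem.Str.isIn "fhb" na)
          (PySem.Str.isIn "fusarium" na) (PySem.Str.isIn "scab" na)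
          (PySem.Str.isIn "spot" na) (PySem.Str.isIn "mildew" na) (PySem.Str.isIn "healthy" na))
        (pvMaskOf (PySem.Str.isIn "rust" nb) (PySem.Str.isIn "blast" nb)
          (PySem.Str.isIn "blight" nb) (PySem.Str.isIn "fhb" nb)
          (PySem.Str.isIn "fusarium" nb) (PySem.Str.isIn "scab" nb)
          (PySem.Str.isIn "spot" nb) (PySem.Str.isIn "mildew" nb) (PySem.Str.isIn "healthy" nb)) ≠ 0)) := by
  rfl

theorem pv_if_or (c b : Bool) : (if c = true then true else b) = (c || b) := by
  cases c <;> simp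

-- ===== VERDICT (by name: the statement is the Claim_ definition above) =====
theorem same_disease_family_py_spec : Claim_equal_same_disease_family_py := by
  intro na nb _
  unfold Spec_same_disease_family_py
  rw [pv_alt_char, pv_mask_eq, pv_mask_eq, pv_land_eq]
  unfold same_disease_family_py pvFamilies pvLoopA
  simp only [pv_fam0_any, pv_fam1_any, pv_fam2_any, pv_fam3_any, pv_fam4_any, pv_fam5_any,
    pvLoopA, pv_if_or]
  simp [Bool.or_assoc]
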